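-- pv_equiv track=rewrite | github.com/dsbalico/sudoku-solver-simulated-annealing | SudokuSolverAnnealing.py | get_list_cost
-- ===== SOURCE A (Python) =====
-- def get_list_cost(arr):
--     """ Calculates the cost of a list based on the number of repeated elements.
--
--     Parameters:
--     - arr (list): A list of elements to be evaluated for repetition cost.
--
--     Returns:
--     - An integer representing the cost of repeated elements in the input list. """
--     cost = 0
--     size = len(arr)
--
--     for i in range(size): # Iterate through each element in the list
--         for j in range(i + 1, size): # Iterate through each subsequent element in the list
--             if arr[i] == arr[j]: # If there is a repeated element
--                 cost += 1 # Increment the cost by 1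
--
--     return cost
-- ===== SOURCE B (Python) =====
-- def get_list_cost(arr):
--     """Cost = number of unordered index pairs (i, j) with equal elements.
--
--     Counts occurrences of each value in one pass, then sums c*(c-1)//2
--     per group instead of scanning all pairs."""
--     counts = {}
--     for x in arr:
--         counts[x] = counts.get(x, 0) + 1
--     cost = 0
--     for c in counts.values():
--         cost += c * (c - 1) // 2
--     return cost
-- ===== Notes on version B (the rewrite author's own statement) =====
-- stated objective: faster
-- what changed: Replaced the O(n^2) nested pairwise comparison loop with a one-pass frequency dictionary followed by a per-group c*(c-1)//2 combinatorial sum.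
import Mathlib
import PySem

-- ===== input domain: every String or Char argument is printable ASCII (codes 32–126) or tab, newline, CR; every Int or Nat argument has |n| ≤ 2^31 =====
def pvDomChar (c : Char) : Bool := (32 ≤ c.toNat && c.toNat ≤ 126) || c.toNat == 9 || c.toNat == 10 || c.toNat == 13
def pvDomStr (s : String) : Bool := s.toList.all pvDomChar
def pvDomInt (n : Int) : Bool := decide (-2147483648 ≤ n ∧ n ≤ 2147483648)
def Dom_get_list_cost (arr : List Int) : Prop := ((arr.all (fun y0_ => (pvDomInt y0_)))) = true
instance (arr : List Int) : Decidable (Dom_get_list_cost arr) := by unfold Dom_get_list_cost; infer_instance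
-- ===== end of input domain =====

-- B replaces A's O(n^2) nested pairwise scan by a one-pass frequency dictionary plus a
-- per-group c*(c-1)//2 sum (measured faster; asymptotic change).

-- ===== PORT A =====
-- indices i, j always lie in range, so arr[i] is pyGetD with an arbitrary default (exact)
def get_list_cost (arr : List Int) : Int :=
  let size : Int := arr.length
  (PySem.List.pyRange 0 size).foldl
    (fun cost i =>
      (PySem.List.pyRange (i + 1) size).foldl
        (fun cost j =>
          if PySem.List.pyGetD arr i 0 == PySem.List.pyGetD arr j 0 then cost + 1 else cost)
        cost)
    0

-- ===== PORT B =====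
def get_list_cost_alt (arr : List Int) : Int :=
  let counts : PySem.Dict Int Int :=
    arr.foldl (fun d x => d.insert x (d.getD x 0 + 1)) PySem.Dict.empty
  counts.values.foldl (fun cost c => cost + PySem.Int.floordiv (c * (c - 1)) 2) 0

-- ===== PRECONDITION & SPEC =====
def Spec_get_list_cost (arr : List Int) (out : Int) : Prop := out = get_list_cost_alt arr
instance (arr : List Int) (out : Int) : Decidable (Spec_get_list_cost arr out) := by unfold Spec_get_list_cost; infer_instance

-- ===== CLAIM (what is proved, stated in full; the proofs are below) =====
def Claim_equal_get_list_cost : Prop := ∀ (arr : List Int), Dom_get_list_cost arr → Spec_get_list_cost arr (get_list_cost arr)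

-- ===== LEMMAS AND PROOFS =====

-- reference value: sum over positions of the count of later equal elements
def pairCost : List Int → Int
  | [] => 0
  | x :: xs => (xs.count x : Int) + pairCost xs

-- c*(c-1)//2 for a Nat count
def ch2 (n : Nat) : Int := ((n * (n - 1) / 2 : Nat) : Int)

lemma ch2_succ (n : Nat) : ch2 (n + 1) = n + ch2 n := by
  unfold ch2
  rw [← Nat.choose_two_right, ← Nat.choose_two_right]
  have : (n + 1).choose 2 = n.choose 1 + n.choose 2 := Nat.choose_succ_succ n 1
  rw [this, Nat.choose_one_right]
  push_cast; ring

lemma floordiv_ch2 (n : Nat) :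
    PySem.Int.floordiv ((n : Int) * ((n : Int) - 1)) 2 = ch2 n := by
  rw [PySem.Int.floordiv_eq_ediv_of_pos (by norm_num)]
  cases n with
  | zero => simp [ch2]
  | succ m =>
    have h : ((m + 1 : Nat) : Int) * (((m + 1 : Nat) : Int) - 1) = (((m + 1) * m : Nat) : Int) := by
      push_cast; ring
    rw [h]
    unfold ch2
    have h2 : (m + 1) * (m + 1 - 1) = (m + 1) * m := by simp
    rw [h2]
    generalize (m + 1) * m = a
    omega

lemma sum_ch2 : ∀ (l S : List Int), S.Nodup → (∀ k, k ∈ l → k ∈ S) →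
    (S.map (fun k => ch2 (l.count k))).sum = pairCost l := by
  intro l
  induction l with
  | nil =>
    intro S _ _
    simp [pairCost, ch2]
  | cons x xs ih =>
    intro S hnd hmem
    have hx : x ∈ S := hmem x (by simp)
    have hperm : S.Perm (x :: S.erase x) := List.perm_cons_erase hx
    have hxe : x ∉ S.erase x := (List.Nodup.mem_erase_iff hnd).mp.mt (by simp)
    have hsum := (hperm.map (fun k => ch2 ((x :: xs).count k))).sum_eq
    have hsum' := (hperm.map (fun k => ch2 (xs.count k))).sum_eq
    have herase : ∀ k ∈ S.erase x,
        (fun k => ch2 ((x :: xs).count k)) k = (fun k => ch2 (xs.count k)) k := by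
      intro k hk
      have hne : k ≠ x := by rintro rfl; exact hxe hk
      simp [Ne.symm hne]
    have hIH : (S.map (fun k => ch2 (xs.count k))).sum = pairCost xs :=
      ih S hnd (fun k hk => hmem k (by simp [hk]))
    have hsub : ((S.erase x).map (fun k => ch2 (xs.count k))).sum
        = pairCost xs - ch2 (xs.count x) := by
      rw [hsum'] at hIH
      simp only [List.map_cons, List.sum_cons] at hIH
      linarith
    rw [hsum]
    simp only [List.map_cons, List.sum_cons]
    rw [List.map_congr_left herase, hsub, List.count_cons_self, ch2_succ]
    rw [show pairCost (x :: xs) = (xs.count x : Int) + pairCost xs from rfl]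
    ring

-- B computes pairCost
lemma alt_eq_pairCost (arr : List Int) : get_list_cost_alt arr = pairCost arr := by
  show ((arr.foldl (fun d x => d.insert x (d.getD x 0 + 1)) PySem.Dict.empty).values.foldl
      (fun cost c => cost + PySem.Int.floordiv (c * (c - 1)) 2) 0) = pairCost arr
  rw [PySem.Dict.foldl_insert_getD_add_one_eq_counter]
  rw [PySem.List.foldl_add]
  have hv : (PySem.Dict.counter arr).values
      = (PySem.Set.ofList arr).map (fun k => ((arr.count k : Nat) : Int)) := by
    show (PySem.Dict.counter arr).items.map (·.2) = _
    rw [PySem.Dict.items_counter, List.map_map]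
    rfl
  rw [hv, List.map_map]
  have hc : ((PySem.Set.ofList arr).map
        ((fun c => PySem.Int.floordiv (c * (c - 1)) 2) ∘ fun k => ((arr.count k : Nat) : Int)))
      = (PySem.Set.ofList arr).map (fun k => ch2 (arr.count k)) := by
    apply List.map_congr_left
    intro k _
    exact floordiv_ch2 (arr.count k)
  rw [hc, sum_ch2 arr (PySem.Set.ofList arr) (PySem.Set.nodup_ofList arr)
        (fun k hk => (PySem.Set.mem_ofList arr k).mpr hk)]
  simp

-- A's inner loop: counting later matches of v from position m on
lemma inner_fold (arr : List Int) (v : Int) :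
    ∀ (fuel m : Nat) (c : Int), arr.length - m = fuel →
    (PySem.List.pyRange (m : Int) (arr.length : Int)).foldl
      (fun cost j => if v == PySem.List.pyGetD arr j 0 then cost + 1 else cost) c
    = c + ((arr.drop m).count v : Int) := by
  intro fuel
  induction fuel with
  | zero =>
    intro m c h
    have hm : arr.length ≤ m := by omega
    have hr : PySem.List.pyRange (m : Int) (arr.length : Int) = [] := by
      simp [PySem.List.pyRange]; omega
    rw [hr, List.drop_eq_nil_of_le hm]
    simp
  | succ f ih =>
    intro m c h
    have hm : m < arr.length := by omega
    rw [PySem.List.pyRange_one_cons (by exact_mod_cast hm)]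
    simp only [List.foldl_cons]
    have hcast : ((m : Int) + 1) = ((m + 1 : Nat) : Int) := by push_cast; ring
    rw [hcast, ih (m + 1) _ (by omega)]
    rw [List.drop_eq_getElem_cons hm]
    rw [PySem.List.pyGetD_eq_getElem arr 0 (by positivity) (by exact_mod_cast hm)]
    simp only [Int.toNat_natCast, List.count_cons]
    by_cases hvm : v = arr[m]
    · simp [hvm]; omega
    · simp [hvm, Ne.symm hvm]

-- A's outer loop from position m computes pairCost of the suffix
lemma outer_fold (arr : List Int) :
    ∀ (fuel m : Nat) (c : Int), arr.length - m = fuel →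
    (PySem.List.pyRange (m : Int) (arr.length : Int)).foldl
      (fun cost i =>
        (PySem.List.pyRange (i + 1) (arr.length : Int)).foldl
          (fun cost j =>
            if PySem.List.pyGetD arr i 0 == PySem.List.pyGetD arr j 0 then cost + 1 else cost)
          cost) c
    = c + pairCost (arr.drop m) := by
  intro fuel
  induction fuel with
  | zero =>
    intro m c h
    have hm : arr.length ≤ m := by omega
    have hr : PySem.List.pyRange (m : Int) (arr.length : Int) = [] := by
      simp [PySem.List.pyRange]; omega
    rw [hr, List.drop_eq_nil_of_le hm]
    simp [pairCost]
  | succ f ih =>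
    intro m c h
    have hm : m < arr.length := by omega
    rw [PySem.List.pyRange_one_cons (by exact_mod_cast hm)]
    simp only [List.foldl_cons]
    have hcast : ((m : Int) + 1) = ((m + 1 : Nat) : Int) := by push_cast; ring
    rw [hcast, inner_fold arr _ (arr.length - (m + 1)) (m + 1) c rfl]
    rw [ih (m + 1) _ (by omega)]
    rw [List.drop_eq_getElem_cons hm]
    rw [PySem.List.pyGetD_eq_getElem arr 0 (by positivity) (by exact_mod_cast hm)]
    simp only [Int.toNat_natCast]
    rw [show pairCost (arr[m] :: arr.drop (m + 1))
        = ((arr.drop (m + 1)).count arr[m] : Int) + pairCost (arr.drop (m + 1)) from rfl]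
    ring

lemma a_eq_pairCost (arr : List Int) : get_list_cost arr = pairCost arr := by
  have h := outer_fold arr arr.length 0 0 (by omega)
  simp only [Nat.cast_zero, List.drop_zero, zero_add] at h
  exact h

-- ===== VERDICT (by name: the statement is the Claim_ definition above) =====
theorem get_list_cost_spec : Claim_equal_get_list_cost := by
  intro arr _
  unfold Spec_get_list_cost
  rw [a_eq_pairCost, alt_eq_pairCost]
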